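-- pv_equiv track=rewrite | github.com/SeredaVladislav/Repository_my_PC | More/matrix.py | quarter_amounts
-- ===== SOURCE A (Python) =====
-- def quarter_amounts(num_rows_col: int) -> str:
--     matrix = [
--         [1, 4, 3, 4, 7],
--         [5, 6, 7, 8, 4],
--         [3, 8, 5, 6, 1],
--         [1, 2, 9, 4, 8],
--         [5, 6, 1, 5, 8],
--     ]
--     up = 0
--     right = 0
--     down = 0
--     left = 0
--
--     for i in range(num_rows_col):
--         for j in range(num_rows_col):
--             if i < j and i < (num_rows_col - 1 - j):
--                 up += matrix[i][j]
--             elif j > i > (num_rows_col - 1 - j):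
--                 right += matrix[i][j]
--             elif i > j and i > (num_rows_col - 1 - j):
--                 down += matrix[i][j]
--             elif j < i < (num_rows_col - 1 - j):
--                 left += matrix[i][j]
--
--     return (f"Верхняя четверть: {up}\n"
--             f"Правая четверть: {right}\n"
--             f"Нижняя четверть: {down}\n"
--             f"Левая четверть: {left}")
-- ===== SOURCE B (Python) =====
-- def quarter_amounts(num_rows_col: int) -> str:
--     matrix = [
--         [1, 4, 3, 4, 7],
--         [5, 6, 7, 8, 4],
--         [3, 8, 5, 6, 1],
--         [1, 2, 9, 4, 8],
--         [5, 6, 1, 5, 8],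
--     ]
--     n = num_rows_col
--     up = sum(matrix[i][j] for i in range(n) for j in range(i + 1, n - 1 - i))
--     right = sum(matrix[i][j] for i in range(n) for j in range(max(i + 1, n - i), n))
--     down = sum(matrix[i][j] for i in range(n) for j in range(n - i, i))
--     left = sum(matrix[i][j] for i in range(n) for j in range(0, min(i, n - 1 - i)))
--     return (f"Верхняя четверть: {up}\n"
--             f"Правая четверть: {right}\n"
--             f"Нижняя четверть: {down}\n"
--             f"Левая четверть: {left}")
-- ===== Notes on version B (the rewrite author's own statement) =====
-- stated objective: alternative
-- what changed: Replaces the single full-grid scan with a four-way if/elif classification by four separate sums, each iterating only over its own triangular region with bounds derived from the inequalities.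
import Mathlib
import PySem

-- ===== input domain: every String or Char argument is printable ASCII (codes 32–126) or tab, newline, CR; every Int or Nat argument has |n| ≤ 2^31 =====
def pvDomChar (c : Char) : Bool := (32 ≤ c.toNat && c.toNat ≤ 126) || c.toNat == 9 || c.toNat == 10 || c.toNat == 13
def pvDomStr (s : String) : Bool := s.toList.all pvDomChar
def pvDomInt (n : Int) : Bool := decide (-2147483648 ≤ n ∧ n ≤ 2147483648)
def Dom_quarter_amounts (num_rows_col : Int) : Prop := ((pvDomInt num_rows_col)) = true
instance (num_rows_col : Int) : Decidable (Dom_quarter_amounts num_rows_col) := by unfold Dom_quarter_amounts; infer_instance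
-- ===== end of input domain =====

-- B replaces A's single n×n scan with a 4-way if/elif by four separate sums, each over only its
-- own triangular region (bounds derived from A's inequalities); same hardcoded matrix and output.

-- ===== PORT A =====
def pvMatrix : List (List Int) :=
  [[1, 4, 3, 4, 7], [5, 6, 7, 8, 4], [3, 8, 5, 6, 1], [1, 2, 9, 4, 8], [5, 6, 1, 5, 8]]

-- matrix[i][j]; in range for every access inside Pre_ (n ≤ 5), default 0 only outside it
def pvMget (i j : Int) : Int :=
  PySem.List.pyGetD (PySem.List.pyGetD pvMatrix i []) j 0

def pvFmt (up right down left : Int) : String :=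
  "Верхняя четверть: " ++ PySem.Int.toStr up ++ "\n" ++
  "Правая четверть: " ++ PySem.Int.toStr right ++ "\n" ++
  "Нижняя четверть: " ++ PySem.Int.toStr down ++ "\n" ++
  "Левая четверть: " ++ PySem.Int.toStr left

def quarter_amounts (num_rows_col : Int) : String :=
  let n := num_rows_col
  let st :=
    (PySem.List.pyRange 0 n 1).foldl (fun st i =>
      (PySem.List.pyRange 0 n 1).foldl (fun st j =>
        let (up, right, down, left) := st
        if i < j ∧ i < n - 1 - j then (up + pvMget i j, right, down, left)
        else if j > i ∧ i > n - 1 - j then (up, right + pvMget i j, down, left)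
        else if i > j ∧ i > n - 1 - j then (up, right, down + pvMget i j, left)
        else if j < i ∧ i < n - 1 - j then (up, right, down, left + pvMget i j)
        else st) st) ((0 : Int), (0 : Int), (0 : Int), (0 : Int))
  pvFmt st.1 st.2.1 st.2.2.1 st.2.2.2

-- ===== PORT B =====
def pvRegionSum (n : Int) (lo hi : Int → Int) : Int :=
  ((PySem.List.pyRange 0 n 1).flatMap (fun i =>
    (PySem.List.pyRange (lo i) (hi i) 1).map (fun j => pvMget i j))).sum

def quarter_amounts_alt (num_rows_col : Int) : String :=
  let n := num_rows_col
  let up := pvRegionSum n (fun i => i + 1) (fun i => n - 1 - i)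
  let right := pvRegionSum n (fun i => max (i + 1) (n - i)) (fun _ => n)
  let down := pvRegionSum n (fun i => n - i) (fun i => i)
  let left := pvRegionSum n (fun _ => 0) (fun i => min i (n - 1 - i))
  pvFmt up right down left

-- ===== PRECONDITION & SPEC =====
-- Pre_ excludes n > 5, where the Python A raises IndexError on matrix[i][j]
def Pre_quarter_amounts (num_rows_col : Int) : Prop := num_rows_col ≤ 5
instance (num_rows_col : Int) : Decidable (Pre_quarter_amounts num_rows_col) := by unfold Pre_quarter_amounts; infer_instance
def pvWitness_quarter_amounts : Int := (5)

def Spec_quarter_amounts (num_rows_col : Int) (out : String) : Prop := out = quarter_amounts_alt num_rows_col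
instance (num_rows_col : Int) (out : String) : Decidable (Spec_quarter_amounts num_rows_col out) := by unfold Spec_quarter_amounts; infer_instance

-- ===== CLAIM (what is proved, stated in full; the proofs are below) =====
def Claim_equal_quarter_amounts : Prop := ∀ (num_rows_col : Int), Dom_quarter_amounts num_rows_col → Pre_quarter_amounts num_rows_col → Spec_quarter_amounts num_rows_col (quarter_amounts num_rows_col)

-- ===== LEMMAS AND PROOFS =====
theorem quarter_amounts_nonpos (n : Int) (hn : n ≤ 0) :
    quarter_amounts n = quarter_amounts_alt n := by
  have h0 : PySem.List.pyRange 0 n 1 = [] := PySem.List.pyRange_one_eq_nil hn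
  simp [quarter_amounts, quarter_amounts_alt, pvRegionSum, h0]

-- ===== VERDICT (by name: the statement is the Claim_ definition above) =====
set_option maxRecDepth 1000000 in
theorem quarter_amounts_spec : Claim_equal_quarter_amounts := by
  intro n _ hpre
  unfold Spec_quarter_amounts
  by_cases hn : n ≤ 0
  · exact quarter_amounts_nonpos n hn
  · unfold Pre_quarter_amounts at hpre
    interval_cases n <;> decide
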